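-- pv_equiv track=rewrite | github.com/grantsrb/mas | tests/test_causal_models.py | is_correct_sameobj_sequence
-- ===== SOURCE A (Python) =====
-- def is_correct_sameobj_sequence(seq, expected_count):
--     demo_count = 0
--     resp_count = 0
--     triggered = False
--     for token in seq:
--         if token in {"D"}:
--             demo_count += not triggered
--             resp_count += triggered
--         if token == "T":
--             triggered = True
--     if seq[-1] != "E":
--         return False
--     return resp_count == expected_count and demo_count == expected_count
-- ===== SOURCE B (Python) =====
-- def is_correct_sameobj_sequence(seq, expected_count):
--     if seq[-1] != "E":
--         return False
--     split = next((i for i, t in enumerate(seq) if t == "T"), len(seq))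
--     demo_count = sum(1 for t in seq[:split] if t == "D")
--     resp_count = sum(1 for t in seq[split:] if t == "D")
--     return resp_count == expected_count and demo_count == expected_count
-- ===== Notes on version B (the rewrite author's own statement) =====
-- stated objective: simpler
-- what changed: Replaces the running triggered-flag loop by a boundary decomposition: find the first 'T' position, then count 'D' tokens on each side of it, with the tail check done first so all scanning is skipped when the last token is not 'E' (constant-factor speedup measured).
import Mathlib
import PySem

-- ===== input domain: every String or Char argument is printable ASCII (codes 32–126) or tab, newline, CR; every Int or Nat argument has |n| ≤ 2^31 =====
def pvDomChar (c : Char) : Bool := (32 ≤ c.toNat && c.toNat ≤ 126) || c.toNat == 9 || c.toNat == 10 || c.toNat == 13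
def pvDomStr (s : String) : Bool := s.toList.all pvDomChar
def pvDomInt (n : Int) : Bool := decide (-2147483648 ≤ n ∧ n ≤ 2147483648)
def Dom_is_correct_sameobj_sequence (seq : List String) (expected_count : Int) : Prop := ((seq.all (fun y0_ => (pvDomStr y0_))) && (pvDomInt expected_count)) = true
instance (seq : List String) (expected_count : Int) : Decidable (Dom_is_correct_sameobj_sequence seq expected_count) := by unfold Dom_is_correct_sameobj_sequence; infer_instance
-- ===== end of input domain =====

-- B changes the decomposition (first-'T' boundary then count each side) instead of A's running flag; return value only, 'simpler'.

-- ===== PORT A =====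
-- one loop step of A: the two `if`s in order, counters updated with bool-as-int
def pvStepA (s : Int × Int × Bool) (token : String) : Int × Int × Bool :=
  let d := if token = "D" then s.1 + (if s.2.2 then 0 else 1) else s.1
  let r := if token = "D" then s.2.1 + (if s.2.2 then 1 else 0) else s.2.1
  let trig := if token = "T" then true else s.2.2
  (d, r, trig)

def is_correct_sameobj_sequence (seq : List String) (expected_count : Int) : Bool :=
  let st := seq.foldl pvStepA (0, 0, false)
  match PySem.List.pyGet? seq (-1) with
  | none => false   -- IndexError in Python; excluded by Pre_
  | some last =>
    if last ≠ "E" then false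
    else decide (st.2.1 = expected_count) && decide (st.1 = expected_count)

-- ===== PORT B =====
def is_correct_sameobj_sequence_alt (seq : List String) (expected_count : Int) : Bool :=
  match PySem.List.pyGet? seq (-1) with
  | none => false   -- IndexError in Python; excluded by Pre_
  | some last =>
    if last ≠ "E" then false
    else
      let split := (seq.findIdx? (· = "T")).getD seq.length
      let demo_count : Int := ((seq.take split).filter (· = "D")).length
      let resp_count : Int := ((seq.drop split).filter (· = "D")).length
      decide (resp_count = expected_count) && decide (demo_count = expected_count)

-- ===== PRECONDITION & SPEC =====
-- Pre_ excludes only the empty list, on which both Pythons raise IndexError at seq[-1].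
def Pre_is_correct_sameobj_sequence (seq : List String) (expected_count : Int) : Prop := seq ≠ []
instance (seq : List String) (expected_count : Int) : Decidable (Pre_is_correct_sameobj_sequence seq expected_count) := by unfold Pre_is_correct_sameobj_sequence; infer_instance
def pvWitness_is_correct_sameobj_sequence : List String × Int := (["D", "T", "D", "E"], 1)

def Spec_is_correct_sameobj_sequence (seq : List String) (expected_count : Int) (out : Bool) : Prop := out = is_correct_sameobj_sequence_alt seq expected_count
instance (seq : List String) (expected_count : Int) (out : Bool) : Decidable (Spec_is_correct_sameobj_sequence seq expected_count out) := by unfold Spec_is_correct_sameobj_sequence; infer_instance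

-- ===== CLAIM (what is proved, stated in full; the proofs are below) =====
def Claim_equal_is_correct_sameobj_sequence : Prop := ∀ (seq : List String) (expected_count : Int), Dom_is_correct_sameobj_sequence seq expected_count → Pre_is_correct_sameobj_sequence seq expected_count → Spec_is_correct_sameobj_sequence seq expected_count (is_correct_sameobj_sequence seq expected_count)

-- ===== LEMMAS AND PROOFS =====
-- number of "D" tokens, as an Int (Python's counters are ints)
def pvCountD (l : List String) : Int := ((l.filter (· = "D")).length : Int)

-- A's loop after the flag is set: every "D" goes to resp
theorem pvFoldA_triggered (l : List String) (d r : Int) :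
    l.foldl pvStepA (d, r, true) = (d, r + pvCountD l, true) := by
  induction l generalizing r with
  | nil => simp [pvCountD]
  | cons t rest ih =>
    by_cases ht : t = "D" <;>
      simp [List.foldl_cons, pvStepA, ht, ih, pvCountD] <;> ring

-- A's loop before the flag is set: demos up to the first "T", responses after it
theorem pvFoldA_untriggered (l : List String) (d r : Int) :
    l.foldl pvStepA (d, r, false) =
      (d + pvCountD (l.take (((l.findIdx? (· = "T")).getD l.length))),
       r + pvCountD (l.drop (((l.findIdx? (· = "T")).getD l.length))),
       l.contains "T") := by
  induction l generalizing d with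
  | nil => simp [pvCountD]
  | cons t rest ih =>
    by_cases hT : t = "T"
    · subst hT
      have : ¬ ("T" : String) = "D" := by decide
      simp [List.foldl_cons, pvStepA, this, List.findIdx?_cons, pvFoldA_triggered, pvCountD,
        List.filter]
    · have hfind : (t :: rest).findIdx? (· = "T") =
          ((rest.findIdx? (· = "T")).map (· + 1)) := by
        simp [List.findIdx?_cons, hT]
      have hgetD : ((t :: rest).findIdx? (· = "T")).getD (t :: rest).length =
          ((rest.findIdx? (· = "T")).getD rest.length) + 1 := by
        rw [hfind]; cases rest.findIdx? (· = "T") <;> simp [List.length_cons]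
      have hstep : pvStepA (d, r, false) t = ((if t = "D" then d + 1 else d), r, false) := by
        simp [pvStepA, hT]
      rw [List.foldl_cons, hstep, ih, hgetD, List.take_succ_cons, List.drop_succ_cons]
      by_cases ht : t = "D" <;> simp [pvCountD, ht, hT] <;> first | ring | (intro h; exact absurd h.symm hT)

-- ===== VERDICT (by name: the statement is the Claim_ definition above) =====
theorem is_correct_sameobj_sequence_spec : Claim_equal_is_correct_sameobj_sequence := by
  intro seq k _ hpre
  unfold Spec_is_correct_sameobj_sequence
  unfold is_correct_sameobj_sequence is_correct_sameobj_sequence_alt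
  rw [pvFoldA_untriggered]
  cases h : PySem.List.pyGet? seq (-1) with
  | none => simp
  | some last =>
    by_cases hE : last = "E" <;> simp [hE, pvCountD]
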